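-- pv_equiv track=rewrite | github.com/0xWRNG/SMak | blueprint.py | matrix_to_rectangles
-- ===== SOURCE A (Python) =====
-- def get_segments(row):
--     segments = []
--     start = 0
--     current_color = row[0]
--     for j in range(1, len(row)):
--         if row[j] != current_color:
--             segments.append((start, j - 1, current_color))
--             start = j
--             current_color = row[j]
--     segments.append((start, len(row) - 1, current_color))
--     return segments
--
-- def matrix_to_rectangles(matrix):
--     if not matrix or not matrix[0]:
--         return 0, []
--
--     rows = len(matrix)
--
--     active_rects = []
--     final_rects = []
--
--     for i in range(rows):
--         segments = get_segments(matrix[i])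
--         remaining_active = active_rects.copy()
--         new_active_rects = []
--
--         for seg in segments:
--             start_col, end_col, color = seg
--             found = False
--
--             for idx, rect in enumerate(remaining_active):
--                 r_start, r_end, r_sc, r_ec, r_color = rect
--                 if r_sc == start_col and r_ec == end_col and r_color == color:
--                     new_rect = (r_start, i, r_sc, r_ec, r_color)
--                     new_active_rects.append(new_rect)
--                     del remaining_active[idx]
--                     found = True
--                     break
--
--             if not found:
--                 new_rect = (i, i, start_col, end_col, color)
--                 new_active_rects.append(new_rect)
--
--         final_rects.extend(remaining_active)
--         active_rects = new_active_rects
--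
--     final_rects.extend(active_rects)
--
--     formatted_rects = []
--     for rect in final_rects:
--         start_row, end_row, start_col, end_col, color = rect
--         formatted_rects.append((start_row, start_col, end_row, end_col, color))
--
--     return len(formatted_rects), formatted_rects
-- ===== SOURCE B (Python) =====
-- def get_segments(row):
--     segments = []
--     start = 0
--     current_color = row[0]
--     for j in range(1, len(row)):
--         if row[j] != current_color:
--             segments.append((start, j - 1, current_color))
--             start = j
--             current_color = row[j]
--     segments.append((start, len(row) - 1, current_color))
--     return segments
--
-- def matrix_to_rectangles(matrix):
--     if not matrix or not matrix[0]:
--         return 0, []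
--     seg_rows = [get_segments(row) for row in matrix]
--     n = len(seg_rows)
--     rects = []
--     for e, segs in enumerate(seg_rows):
--         for seg in segs:
--             if e + 1 < n and seg in seg_rows[e + 1]:
--                 continue  # vertical run continues below: not finished at row e
--             s = e
--             while s > 0 and seg in seg_rows[s - 1]:
--                 s -= 1
--             start_col, end_col, color = seg
--             rects.append((s, start_col, e, end_col, color))
--     return len(rects), rects
-- ===== Notes on version B (the rewrite author's own statement) =====
-- stated objective: alternative
-- what changed: A streams through the rows once, carrying a mutable list of active rectangles that each row's segments match against and delete from; B carries no cross-row state at all: it precomputes every row's segment list, and for each segment that does not reappear in the next row (a rectangle's bottom edge) it scans upward to find the top row, emitting the rectangle fully formatted on the spot.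
import Mathlib
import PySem

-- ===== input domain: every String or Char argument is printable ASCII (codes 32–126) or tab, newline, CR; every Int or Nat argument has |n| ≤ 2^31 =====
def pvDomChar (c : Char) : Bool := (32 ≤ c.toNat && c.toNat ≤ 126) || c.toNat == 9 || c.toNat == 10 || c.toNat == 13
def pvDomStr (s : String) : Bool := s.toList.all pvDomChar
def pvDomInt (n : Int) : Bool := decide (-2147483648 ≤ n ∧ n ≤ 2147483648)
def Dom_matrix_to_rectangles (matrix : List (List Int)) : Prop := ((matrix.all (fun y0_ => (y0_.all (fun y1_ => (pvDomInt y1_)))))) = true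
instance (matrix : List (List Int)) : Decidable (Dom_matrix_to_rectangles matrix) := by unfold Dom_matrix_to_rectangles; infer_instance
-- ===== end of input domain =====

-- B keeps no cross-row state: it precomputes all rows' segment lists, emits a rectangle exactly
-- when a segment does not reappear in the next row, and finds its top row by scanning upward.
-- Return values are proved equal on Pre_ (equal outputs in A's exact order).

abbrev pvR5 : Type := Int × Int × Int × Int × Int
abbrev pvK : Type := Int × Int × Int

-- ===== PORT A =====
def segStepA (row : List Int) (st : List pvK × Int × Int) (j : Int) : List pvK × Int × Int :=
  let v := PySem.List.pyGetD row j 0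
  if v ≠ st.2.2 then (st.1 ++ [(st.2.1, j - 1, st.2.2)], j, v) else st

-- get_segments(row); on an empty row Python raises IndexError at row[0] (excluded by Pre_ where it is reached)
def getSegA (row : List Int) : List pvK :=
  let n : Int := (row.length : Int)
  let st := (PySem.List.pyRange 1 n).foldl (segStepA row) ([], 0, PySem.List.pyGetD row 0 0)
  st.1 ++ [(st.2.1, n - 1, st.2.2)]

-- the inner `for idx, rect in enumerate(remaining_active): … del remaining_active[idx]; break` loop
def findDelA (rem : List pvR5) (sc ec c : Int) : Option (pvR5 × List pvR5) :=
  match rem with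
  | [] => none
  | r :: rest =>
    if r.2.2.1 = sc ∧ r.2.2.2.1 = ec ∧ r.2.2.2.2 = c then some (r, rest)
    else match findDelA rest sc ec c with
         | none => none
         | some (m, rem') => some (m, r :: rem')

def innerStepA (i : Int) (p : List pvR5 × List pvR5) (seg : pvK) : List pvR5 × List pvR5 :=
  match findDelA p.1 seg.1 seg.2.1 seg.2.2 with
  | some (m, rem') => (rem', p.2 ++ [(m.1, i, m.2.2.1, m.2.2.2.1, m.2.2.2.2)])
  | none => (p.1, p.2 ++ [(i, i, seg.1, seg.2.1, seg.2.2)])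

def rowStepA (matrix : List (List Int)) (st : List pvR5 × List pvR5) (i : Int) : List pvR5 × List pvR5 :=
  let segments := getSegA (PySem.List.pyGetD matrix i [])
  let inner := segments.foldl (innerStepA i) (st.1, [])
  (inner.2, st.2 ++ inner.1)

def matrix_to_rectangles (matrix : List (List Int)) : Int × (List (Int × Int × Int × Int × Int)) :=
  if matrix.isEmpty || matrix.headI.isEmpty then (0, [])
  else
    let rows : Int := (matrix.length : Int)
    let st := (PySem.List.pyRange 0 rows).foldl (rowStepA matrix) ([], [])
    let finalRects := st.2 ++ st.1
    let formatted := finalRects.map (fun r => (r.1, r.2.2.1, r.2.1, r.2.2.2.1, r.2.2.2.2))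
    ((formatted.length : Int), formatted)

-- ===== PORT B =====
-- Source B reuses the module helper get_segments verbatim, so its port shares getSegA.

-- `s = e; while s > 0 and seg in seg_rows[s - 1]: s -= 1`
def scanUp (segRows : List (List pvK)) (seg : pvK) (s : Int) : Int :=
  if h : 0 < s ∧ seg ∈ PySem.List.pyGetD segRows (s - 1) [] then scanUp segRows seg (s - 1) else s
termination_by s.toNat
decreasing_by omega

-- body of `for seg in segs: if e+1 < n and seg in seg_rows[e+1]: continue; …; rects.append(…)`
def finStep (segRows : List (List pvK)) (n e : Int) (acc : List pvR5) (seg : pvK) : List pvR5 :=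
  if e + 1 < n ∧ seg ∈ PySem.List.pyGetD segRows (e + 1) [] then acc
  else acc ++ [(scanUp segRows seg e, seg.1, e, seg.2.1, seg.2.2)]

def matrix_to_rectangles_alt (matrix : List (List Int)) : Int × (List (Int × Int × Int × Int × Int)) :=
  if matrix.isEmpty || matrix.headI.isEmpty then (0, [])
  else
    let segRows := matrix.map getSegA
    let n : Int := (segRows.length : Int)
    let rects := (PySem.List.enumerate segRows).foldl
      (fun acc p => p.2.foldl (finStep segRows n p.1) acc) []
    ((rects.length : Int), rects)

-- ===== PRECONDITION & SPEC =====
-- Pre_ excludes exactly the inputs on which A raises IndexError: a matrix whose first row is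
-- nonempty but which contains some empty later row (get_segments reads row[0]); B raises there too.
def Pre_matrix_to_rectangles (matrix : List (List Int)) : Prop :=
  matrix = [] ∨ matrix.headI = [] ∨ ∀ row ∈ matrix, row ≠ []
instance (matrix : List (List Int)) : Decidable (Pre_matrix_to_rectangles matrix) := by unfold Pre_matrix_to_rectangles; infer_instance
def pvWitness_matrix_to_rectangles : List (List Int) := [[1, 1], [1, 2]]

def Spec_matrix_to_rectangles (matrix : List (List Int)) (out : Int × (List (Int × Int × Int × Int × Int))) : Prop := out = matrix_to_rectangles_alt matrix
instance (matrix : List (List Int)) (out : Int × (List (Int × Int × Int × Int × Int))) : Decidable (Spec_matrix_to_rectangles matrix out) := by unfold Spec_matrix_to_rectangles; infer_instance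

-- ===== CLAIM (what is proved, stated in full; the proofs are below) =====
def Claim_equal_matrix_to_rectangles : Prop := ∀ (matrix : List (List Int)), Dom_matrix_to_rectangles matrix → Pre_matrix_to_rectangles matrix → Spec_matrix_to_rectangles matrix (matrix_to_rectangles matrix)

-- ===== LEMMAS AND PROOFS =====

-- the key (start_col, end_col, color) of an active rectangle, and A's final formatting
def pvKey (r : pvR5) : pvK := (r.2.2.1, r.2.2.2.1, r.2.2.2.2)
def pvFmt (r : pvR5) : pvR5 := (r.1, r.2.2.1, r.2.1, r.2.2.2.1, r.2.2.2.2)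

-- A's active rectangle for segment k after processing rows 0..e
def pvG (segRows : List (List pvK)) (e : Nat) (k : pvK) : pvR5 :=
  (scanUp segRows k (e : Int), (e : Int), k.1, k.2.1, k.2.2)
def pvActive (segRows : List (List pvK)) (e : Nat) : List pvR5 :=
  (segRows.getD e []).map (pvG segRows e)
-- rectangles finished at row e (next row exists)
def pvFin (segRows : List (List pvK)) (e : Nat) : List pvR5 :=
  ((segRows.getD e []).filter (fun k => k ∉ segRows.getD (e + 1) [])).map (pvG segRows e)
-- A's final_rects contribution for rows e, e+1, …  (m rows of finished output)
def pvTail (segRows : List (List pvK)) : Nat → Nat → List pvR5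
  | _, 0 => []
  | e, m + 1 => pvFin segRows e ++ pvTail segRows (e + 1) m

lemma scanUp_zero (segRows : List (List pvK)) (seg : pvK) : scanUp segRows seg 0 = 0 := by
  rw [scanUp]; simp

lemma scanUp_succ (segRows : List (List pvK)) (seg : pvK) (e : Nat) :
    scanUp segRows seg ((e : Int) + 1)
      = if seg ∈ segRows.getD e [] then scanUp segRows seg (e : Int) else (e : Int) + 1 := by
  rw [scanUp]
  have hg : PySem.List.pyGetD segRows ((e : Int) + 1 - 1) [] = segRows.getD e [] := by
    rw [show (e : Int) + 1 - 1 = (e : Int) by ring, PySem.List.pyGetD_natCast]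
  rw [hg]
  by_cases hm : seg ∈ segRows.getD e []
  · rw [dif_pos ⟨by omega, hm⟩, if_pos hm]
    congr 1; ring
  · rw [dif_neg (by tauto), if_neg hm]

lemma pvKey_pvG (segRows : List (List pvK)) (e : Nat) (k : pvK) : pvKey (pvG segRows e k) = k := by
  simp [pvKey, pvG]

-- segments produced by get_segments have strictly increasing start columns
lemma segA_sorted_loop (row : List Int) : ∀ (m : Nat) (t start c : Int) (segs : List pvK),
    start < t → t + (m : Int) = (row.length : Int) →
    segs.Pairwise (fun a b => a.1 < b.1) → (∀ s ∈ segs, s.1 < start) →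
    (let a := (PySem.List.pyRange t (row.length : Int)).foldl (segStepA row) (segs, start, c);
     (a.1 ++ [(a.2.1, (row.length : Int) - 1, a.2.2)]).Pairwise (fun a b => a.1 < b.1)) := by
  intro m
  induction m with
  | zero =>
    intro t start c segs h1 h2 h3 h4
    have hA : PySem.List.pyRange t (row.length : Int) = [] := by simp [show t = (row.length:Int) by omega]
    rw [hA]
    simp only [List.foldl_nil]
    refine List.pairwise_append.mpr ⟨h3, by simp, ?_⟩
    intro a ha b hb
    simp only [List.mem_singleton] at hb
    rw [hb]
    exact h4 a ha
  | succ m ih =>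
    intro t start c segs h1 h2 h3 h4
    rw [PySem.List.pyRange_one_cons (by omega : t < (row.length : Int))]
    simp only [List.foldl_cons]
    by_cases hc : PySem.List.pyGetD row t 0 ≠ c
    · have hA : segStepA row (segs, start, c) t
          = (segs ++ [(start, t - 1, c)], t, PySem.List.pyGetD row t 0) := by
        simp only [segStepA]; rw [if_pos hc]
      rw [hA]
      apply ih (t + 1) t _ _ (by omega) (by omega)
      · refine List.pairwise_append.mpr ⟨h3, by simp, ?_⟩
        intro a ha b hb
        simp only [List.mem_singleton] at hb
        rw [hb]
        exact h4 a ha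
      · intro s hs
        rcases List.mem_append.mp hs with hs | hs
        · exact lt_trans (h4 s hs) h1
        · simp only [List.mem_singleton] at hs; rw [hs]; exact h1
    · have hA : segStepA row (segs, start, c) t = (segs, start, c) := by
        simp only [segStepA]; rw [if_neg hc]
      rw [hA]
      exact ih (t + 1) start c segs (by omega) (by omega) h3 h4

lemma getSegA_nodup (row : List Int) : (getSegA row).Nodup := by
  rcases List.eq_nil_or_concat' row with hr | ⟨_, _, _⟩
  · subst hr; decide
  · have hlen : 1 ≤ row.length := by
      rename_i l x hr; subst hr; simp
    have h := segA_sorted_loop row (row.length - 1) 1 0 (PySem.List.pyGetD row 0 0) [] (by omega)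
      (by omega) (by simp) (by simp)
    unfold getSegA
    simp only at h ⊢
    exact (h.imp (fun {a b} hab => by intro he; rw [he] at hab; exact lt_irrefl _ hab))

-- findDelA on a list of rectangles with pairwise-distinct keys built by g
lemma findDel_g (g : pvK → pvR5) (hg : ∀ k, pvKey (g k) = k) :
    ∀ (l : List pvK), l.Nodup → ∀ (s : pvK),
    findDelA (l.map g) s.1 s.2.1 s.2.2
      = if s ∈ l then some (g s, (l.filter (fun k => k ≠ s)).map g) else none := by
  intro l
  induction l with
  | nil => intro _ s; simp [findDelA]
  | cons r rest ih =>
    intro hnd s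
    have hkey : ∀ k, (g k).2.2.1 = k.1 ∧ (g k).2.2.2.1 = k.2.1 ∧ (g k).2.2.2.2 = k.2.2 := by
      intro k
      have := hg k
      simp only [pvKey, Prod.ext_iff] at this
      exact ⟨this.1, this.2.1, this.2.2⟩
    obtain ⟨hr1, hr2, hr3⟩ := hkey r
    by_cases hrs : r = s
    · subst hrs
      have hc : (g r).2.2.1 = r.1 ∧ (g r).2.2.2.1 = r.2.1 ∧ (g r).2.2.2.2 = r.2.2 := ⟨hr1, hr2, hr3⟩
      simp only [List.map_cons, findDelA, if_pos hc]
      rw [if_pos (by simp)]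
      have hrrest : r ∉ rest := (List.nodup_cons.mp hnd).1
      have : rest.filter (fun k => k ≠ r) = rest :=
        List.filter_eq_self.mpr (fun k hk => by
          simp only [ne_eq, decide_eq_true_eq]
          intro he; rw [he] at hk; exact hrrest hk)
      rw [List.filter_cons_of_neg (by simp), this]
    · have hc : ¬((g r).2.2.1 = s.1 ∧ (g r).2.2.2.1 = s.2.1 ∧ (g r).2.2.2.2 = s.2.2) := by
        rw [hr1, hr2, hr3]
        intro ⟨a, b, c⟩
        exact hrs (Prod.ext a (Prod.ext b c))
      simp only [List.map_cons, findDelA, if_neg hc]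
      rw [ih (List.nodup_cons.mp hnd).2 s]
      by_cases hm : s ∈ rest
      · rw [if_pos hm, if_pos (by simp [hm])]
        rw [List.filter_cons_of_pos (by simp [hrs])]
        rfl
      · rw [if_neg hm, if_neg (by simp only [List.mem_cons, not_or]; exact ⟨fun he => hrs he.symm, hm⟩)]

-- the inner segment loop of A, against remaining_active = l.map g
lemma innerA_fold (i : Int) (g : pvK → pvR5) (hg : ∀ k, pvKey (g k) = k) :
    ∀ (segsCur : List pvK) (l : List pvK) (acc : List pvR5), l.Nodup → segsCur.Nodup →
    segsCur.foldl (innerStepA i) (l.map g, acc)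
      = ((l.filter (fun k => k ∉ segsCur)).map g,
         acc ++ segsCur.map (fun s => ((if s ∈ l then (g s).1 else i), i, s.1, s.2.1, s.2.2))) := by
  intro segsCur
  induction segsCur with
  | nil => intro l acc _ _; simp
  | cons s rest ih =>
    intro l acc hl hnd
    simp only [List.foldl_cons]
    have hkey : (g s).2.2.1 = s.1 ∧ (g s).2.2.2.1 = s.2.1 ∧ (g s).2.2.2.2 = s.2.2 := by
      have := hg s
      simp only [pvKey, Prod.ext_iff] at this
      exact ⟨this.1, this.2.1, this.2.2⟩
    have hsrest : s ∉ rest := (List.nodup_cons.mp hnd).1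
    by_cases hm : s ∈ l
    · have hstep : innerStepA i (l.map g, acc) s
          = ((l.filter (fun k => k ≠ s)).map g, acc ++ [((g s).1, i, s.1, s.2.1, s.2.2)]) := by
        simp only [innerStepA, findDel_g g hg l hl s, if_pos hm]
        rw [hkey.1, hkey.2.1, hkey.2.2]
      rw [hstep, ih (l.filter (fun k => k ≠ s)) _ (hl.filter _) (List.nodup_cons.mp hnd).2]
      simp only [Prod.mk.injEq]; refine ⟨?_, ?_⟩
      · congr 1
        rw [List.filter_filter]
        apply List.filter_congr
        intro k hk
        by_cases hks : k = s
        · simp [hks]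
        · simp [hks]
      · rw [List.append_assoc]
        congr 1
        simp only [List.map_cons, List.singleton_append]
        congr 1
        · rw [if_pos hm]
        · apply List.map_congr_left
          intro k hk
          have hks : k ≠ s := fun he => hsrest (he ▸ hk)
          have : (k ∈ l.filter (fun k => k ≠ s)) ↔ k ∈ l := by
            simp [List.mem_filter, hks]
          rw [if_congr this rfl rfl]
    · have hstep : innerStepA i (l.map g, acc) s
          = (l.map g, acc ++ [(i, i, s.1, s.2.1, s.2.2)]) := by
        simp only [innerStepA, findDel_g g hg l hl s, if_neg hm]
      rw [hstep, ih l _ hl (List.nodup_cons.mp hnd).2]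
      simp only [Prod.mk.injEq]; refine ⟨?_, ?_⟩
      · congr 1
        apply List.filter_congr
        intro k hk
        by_cases hks : k = s
        · subst hks; exact absurd hk hm
        · simp [hks]
      · rw [List.append_assoc]
        congr 1
        simp only [List.map_cons, List.singleton_append]
        congr 1
        rw [if_neg hm]

-- B's per-row emitted list and its concatenation over rows e, e+1, … (m rows)
def pvRowB (segRows : List (List pvK)) (e : Nat) : List pvR5 :=
  ((segRows.getD e []).filter
      (fun seg => ¬((e : Int) + 1 < (segRows.length : Int) ∧ seg ∈ PySem.List.pyGetD segRows ((e : Int) + 1) []))).map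
    (fun seg => (scanUp segRows seg (e : Int), seg.1, (e : Int), seg.2.1, seg.2.2))
def pvB (segRows : List (List pvK)) : Nat → Nat → List pvR5
  | _, 0 => []
  | e, m + 1 => pvRowB segRows e ++ pvB segRows (e + 1) m

lemma segRows_getD (matrix : List (List Int)) (e : Nat) (he : e < matrix.length) :
    (matrix.map getSegA).getD e [] = getSegA (matrix.getD e []) := by
  rw [List.getD_eq_getElem?_getD, List.getD_eq_getElem?_getD, List.getElem?_map,
    List.getElem?_eq_getElem he]
  simp

lemma pyGetD_cast (matrix : List (List Int)) (e : Nat) :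
    PySem.List.pyGetD matrix ((e : Int) + 1) [] = matrix.getD (e + 1) ([] : List Int) := by
  rw [show (e : Int) + 1 = ((e + 1 : Nat) : Int) by push_cast; ring, PySem.List.pyGetD_natCast]

lemma pyGetD_cast' (segRows : List (List pvK)) (e : Nat) :
    PySem.List.pyGetD segRows ((e : Int) + 1) [] = segRows.getD (e + 1) ([] : List pvK) := by
  rw [show (e : Int) + 1 = ((e + 1 : Nat) : Int) by push_cast; ring, PySem.List.pyGetD_natCast]

-- one outer iteration of A at row e+1, from the characterized state
lemma rowA_corr (matrix : List (List Int)) (e : Nat) (he : e + 1 < matrix.length) (F : List pvR5) :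
    rowStepA matrix (pvActive (matrix.map getSegA) e, F) ((e : Int) + 1)
      = (pvActive (matrix.map getSegA) (e + 1), F ++ pvFin (matrix.map getSegA) e) := by
  have hseg : getSegA (PySem.List.pyGetD matrix ((e : Int) + 1) [])
      = (matrix.map getSegA).getD (e + 1) [] := by
    rw [pyGetD_cast, segRows_getD matrix (e + 1) he]
  have hfold := innerA_fold ((e : Int) + 1) (pvG (matrix.map getSegA) e)
    (pvKey_pvG (matrix.map getSegA) e) ((matrix.map getSegA).getD (e + 1) [])
    ((matrix.map getSegA).getD e []) []
    (by rw [segRows_getD matrix e (by omega)]; exact getSegA_nodup _)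
    (by rw [segRows_getD matrix (e + 1) he]; exact getSegA_nodup _)
  simp only [rowStepA, hseg, pvActive, hfold]
  refine Prod.ext ?_ rfl
  dsimp only
  simp only [List.nil_append]
  apply List.map_congr_left
  intro k hk
  have hcast : ((e + 1 : Nat) : Int) = (e : Int) + 1 := by push_cast; ring
  simp [pvG, hcast, scanUp_succ]

-- A's outer loop from row e+1 on, given the invariant state after rows 0..e
lemma outerA (matrix : List (List Int)) : ∀ (m e : Nat) (F : List pvR5),
    e + 1 + m = matrix.length →
    (PySem.List.pyRange ((e : Int) + 1) (matrix.length : Int)).foldl (rowStepA matrix)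
        (pvActive (matrix.map getSegA) e, F)
      = (pvActive (matrix.map getSegA) (matrix.length - 1), F ++ pvTail (matrix.map getSegA) e m) := by
  intro m
  induction m with
  | zero =>
    intro e F h
    rw [PySem.List.pyRange_one_eq_nil (by omega)]
    simp only [List.foldl_nil, pvTail, List.append_nil]
    rw [show e = matrix.length - 1 by omega]
  | succ m ih =>
    intro e F h
    rw [PySem.List.pyRange_one_cons (by omega : (e : Int) + 1 < (matrix.length : Int))]
    simp only [List.foldl_cons]
    rw [rowA_corr matrix e (by omega) F]
    have := ih (e + 1) (F ++ pvFin (matrix.map getSegA) e) (by omega)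
    rw [show ((e + 1 : Nat) : Int) = (e : Int) + 1 by push_cast; ring] at this
    rw [this, pvTail, List.append_assoc]

-- A's first iteration (row 0)
lemma row0_corr (matrix : List (List Int)) (h0 : 0 < matrix.length) :
    rowStepA matrix ([], []) 0 = (pvActive (matrix.map getSegA) 0, []) := by
  have hseg : getSegA (PySem.List.pyGetD matrix 0 []) = (matrix.map getSegA).getD 0 [] := by
    rw [show (0 : Int) = ((0 : Nat) : Int) by norm_num, PySem.List.pyGetD_natCast,
      segRows_getD matrix 0 h0]
  have hfold := innerA_fold 0 (pvG (matrix.map getSegA) 0) (pvKey_pvG (matrix.map getSegA) 0)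
    ((matrix.map getSegA).getD 0 []) [] [] List.nodup_nil
    (by rw [segRows_getD matrix 0 h0]; exact getSegA_nodup _)
  simp only [rowStepA, hseg, List.map_nil] at hfold ⊢
  rw [hfold]
  refine Prod.ext ?_ ?_
  · simp only [pvActive]
    apply List.map_congr_left
    intro k hk
    simp only [List.not_mem_nil, if_false, pvG, Nat.cast_zero, scanUp_zero]
  · simp

-- the inner `for seg in segs` loop of B appends exactly the filtered, formatted row
lemma finRow (segRows : List (List pvK)) (n : Int) (e : Int) :
    ∀ (segs : List pvK) (acc : List pvR5),
    segs.foldl (finStep segRows n e) acc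
      = acc ++ (segs.filter
          (fun seg => ¬(e + 1 < n ∧ seg ∈ PySem.List.pyGetD segRows (e + 1) []))).map
            (fun seg => (scanUp segRows seg e, seg.1, e, seg.2.1, seg.2.2)) := by
  intro segs
  induction segs with
  | nil => intro acc; simp
  | cons s rest ih =>
    intro acc
    simp only [List.foldl_cons, finStep]
    by_cases hc : e + 1 < n ∧ s ∈ PySem.List.pyGetD segRows (e + 1) []
    · have hp : List.filter (fun seg => decide ¬(e + 1 < n ∧ seg ∈ PySem.List.pyGetD segRows (e + 1) [])) (s :: rest)
          = List.filter (fun seg => decide ¬(e + 1 < n ∧ seg ∈ PySem.List.pyGetD segRows (e + 1) [])) rest := by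
        rw [List.filter_cons]
        simp [hc.1, hc.2]
      rw [if_pos hc, ih, hp]
    · have hp : List.filter (fun seg => decide ¬(e + 1 < n ∧ seg ∈ PySem.List.pyGetD segRows (e + 1) [])) (s :: rest)
          = s :: List.filter (fun seg => decide ¬(e + 1 < n ∧ seg ∈ PySem.List.pyGetD segRows (e + 1) [])) rest := by
        rw [List.filter_cons]
        simp only [decide_not]
        simp [hc]
      rw [if_neg hc, ih, hp, List.map_cons]
      simp [List.append_assoc]

-- B's enumerate loop over the row suffix from e
lemma B_fold (segRows : List (List pvK)) : ∀ (m e : Nat) (acc : List pvR5),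
    e + m = segRows.length →
    (PySem.List.enumerate (segRows.drop e) (e : Int)).foldl
        (fun acc p => p.2.foldl (finStep segRows (segRows.length : Int) p.1) acc) acc
      = acc ++ pvB segRows e m := by
  intro m
  induction m with
  | zero =>
    intro e acc h
    rw [List.drop_eq_nil_iff.mpr (by omega)]
    simp [PySem.List.enumerate, pvB]
  | succ m ih =>
    intro e acc h
    rw [List.drop_eq_getElem_cons (by omega : e < segRows.length), PySem.List.enumerate_cons,
      List.foldl_cons]
    have hget : segRows[e] = segRows.getD e [] := by
      rw [List.getD_eq_getElem?_getD, List.getElem?_eq_getElem (by omega : e < segRows.length)]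
      rfl
    dsimp only
    rw [hget, finRow]
    have := ih (e + 1) (acc ++ pvRowB segRows e) (by omega)
    rw [show ((e + 1 : Nat) : Int) = (e : Int) + 1 by push_cast; ring] at this
    simp only [pvRowB] at this
    rw [this, List.append_assoc]
    rfl

-- gluing: B's whole output is A's finished list plus last active row, formatted
lemma glue (segRows : List (List pvK)) : ∀ (m e : Nat), e + m + 1 = segRows.length →
    pvB segRows e (m + 1)
      = (pvTail segRows e m).map pvFmt ++ (pvActive segRows (segRows.length - 1)).map pvFmt := by
  intro m
  induction m with
  | zero =>
    intro e h
    simp only [pvB, pvTail, List.map_nil, List.append_nil, List.nil_append]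
    have he : e = segRows.length - 1 := by omega
    subst he
    simp only [pvRowB, pvActive, List.map_map]
    rw [List.filter_eq_self.mpr ?_]
    · apply List.map_congr_left
      intro k hk
      simp [Function.comp, pvFmt, pvG]
    · intro k hk
      have : ¬((segRows.length - 1 : Nat) : Int) + 1 < (segRows.length : Int) := by omega
      simp only [decide_eq_true_eq, not_and]
      intro hlt
      exact absurd hlt this
  | succ m ih =>
    intro e h
    have hstep : pvB segRows e (m + 1 + 1) = pvRowB segRows e ++ pvB segRows (e + 1) (m + 1) := rfl
    rw [hstep, ih (e + 1) (by omega)]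
    have hrow : pvRowB segRows e = (pvFin segRows e).map pvFmt := by
      simp only [pvRowB, pvFin, List.map_map]
      rw [List.filter_congr ?_]
      · apply List.map_congr_left
        intro k hk
        simp [Function.comp, pvFmt, pvG]
      · intro k hk
        have hlt : ((e : Int)) + 1 < (segRows.length : Int) := by omega
        rw [pyGetD_cast' segRows e]
        simp [hlt]
    rw [hrow, pvTail, List.map_append, List.append_assoc]

-- ===== VERDICT (by name: the statement is the Claim_ definition above) =====
theorem matrix_to_rectangles_spec : Claim_equal_matrix_to_rectangles := by
  intro matrix _ _
  unfold Spec_matrix_to_rectangles matrix_to_rectangles matrix_to_rectangles_alt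
  cases hG : (matrix.isEmpty || matrix.headI.isEmpty) with
  | true => simp only [if_true]
  | false =>
    simp only [Bool.false_eq_true, if_false]
    have hlen : 0 < matrix.length := by
      rcases Bool.or_eq_false_iff.mp hG with ⟨h1, _⟩
      rcases matrix with _ | _
      · simp at h1
      · simp
    have hSlen : (matrix.map getSegA).length = matrix.length := List.length_map ..
    -- A's loop, fully characterized
    have hA : (PySem.List.pyRange 0 (matrix.length : Int)).foldl (rowStepA matrix) ([], [])
        = (pvActive (matrix.map getSegA) (matrix.length - 1),
           pvTail (matrix.map getSegA) 0 (matrix.length - 1)) := by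
      rw [show (0 : Int) = ((0 : Nat) : Int) by norm_num,
        PySem.List.pyRange_one_cons (by exact_mod_cast hlen), List.foldl_cons]
      rw [show ((0 : Nat) : Int) = (0 : Int) by norm_num, row0_corr matrix hlen]
      have := outerA matrix (matrix.length - 1) 0 [] (by omega)
      rw [show ((0 : Nat) : Int) + 1 = 0 + 1 by norm_num] at this
      simpa using this
    -- B's loop, fully characterized
    have hB := B_fold (matrix.map getSegA) matrix.length 0 [] (by omega)
    rw [List.drop_zero, Nat.cast_zero, List.nil_append] at hB
    simp only [hA, hB]
    have hfmt : (fun r : pvR5 => (r.1, r.2.2.1, r.2.1, r.2.2.2.1, r.2.2.2.2)) = pvFmt := rfl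
    rw [hfmt]
    have hglue := glue (matrix.map getSegA) (matrix.length - 1) 0 (by rw [hSlen]; omega)
    rw [hSlen, show matrix.length - 1 + 1 = matrix.length by omega] at hglue
    have hlist : (pvTail (matrix.map getSegA) 0 (matrix.length - 1)
          ++ pvActive (matrix.map getSegA) (matrix.length - 1)).map pvFmt
        = pvB (matrix.map getSegA) 0 matrix.length := by
      rw [List.map_append, ← hglue]
    rw [hlist]
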